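-- pv_equiv track=rewrite | github.com/ahinkim/BOJ | BOJ/구현/BOJ21611.py | explosion
-- ===== SOURCE A (Python) =====
-- def moveballs(balls):
--   newballs = []
--   for ball in balls:
--     if ball != -1 and ball != 0:
--       newballs.append(ball)
--   return newballs
--
-- def explosion(balls):
--   total = 0 #구슬의 개수 번호대로 곱한 값의 total
--   cnt = 1
--   i = 0
--   check = False # 폭발 여부
--   while i < len(balls):
--     if i == len(balls) - 1:
--       if cnt >= 4:
--         total += cnt * balls[i]
--         balls[i - cnt + 1:i + 1] = [-1] * cnt # 특정 범위 인덱스 한 번에 바꾸는 문법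
--         check = True
--       break
--     if balls[i] != balls[i + 1]:
--       if cnt >= 4:
--         total += cnt * balls[i]
--         balls[i - cnt + 1:i + 1] = [-1] * cnt # del ball[a:b + 1] a ~ b 이거와 마찬가지
--         check = True
--       cnt = 1
--     else:
--       cnt += 1
--     i += 1
--   balls = moveballs(balls) # 여기서 balls의 값이 바뀌지 않는다. 또 다른 리스트를 참조하는 것일 뿐 인자로 온 balls가 참조하는 것이랑 다르다. 그래서 return을 해줘야 한다.
--   return balls, check, total
-- ===== SOURCE B (Python) =====
-- # B: one pass over maximal runs via index scanning; no mutation of the argument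
-- # (A marks the input list in place; B builds the output directly), no final
-- # filtering pass: runs of length >= 4 are scored and dropped, shorter runs are
-- # kept unless their value is -1 or 0.
-- def explosion(balls):
--     out = []
--     check = False
--     total = 0
--     i = 0
--     L = len(balls)
--     while i < L:
--         v = balls[i]
--         j = i
--         while j < L and balls[j] == v:
--             j += 1
--         n = j - i
--         if n >= 4:
--             check = True
--             total += n * v
--         elif v != -1 and v != 0:
--             out.extend([v] * n)
--         i = j
--     return out, check, total
-- ===== Notes on version B (the rewrite author's own statement) =====
-- stated objective: simpler
-- what changed: B iterates over maximal runs with an inner scan, scoring runs of length >= 4 and emitting shorter runs directly (skipping -1/0 values), instead of A's element-wise counter with in-place -1 slice-marking followed by a separate filtering pass; B does not mutate the argument (A does), return value is identical.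
import Mathlib
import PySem

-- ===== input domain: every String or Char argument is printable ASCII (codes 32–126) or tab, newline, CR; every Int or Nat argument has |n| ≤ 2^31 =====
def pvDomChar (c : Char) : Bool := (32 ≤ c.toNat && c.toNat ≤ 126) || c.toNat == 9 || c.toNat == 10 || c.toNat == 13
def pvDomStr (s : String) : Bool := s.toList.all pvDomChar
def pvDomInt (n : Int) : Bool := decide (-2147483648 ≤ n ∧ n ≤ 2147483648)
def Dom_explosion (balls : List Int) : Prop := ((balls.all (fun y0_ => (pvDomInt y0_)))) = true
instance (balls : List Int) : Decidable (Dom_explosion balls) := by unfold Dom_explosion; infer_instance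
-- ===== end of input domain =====

-- B replaces A's element-wise counter + in-place -1 slice-marking + final filtering pass
-- by a single run-by-run iteration that builds the output directly (objective: simpler);
-- A mutates its argument in place, B does not — the equivalence proved is about the return value.


-- ===== PORT A =====
-- moveballs: append-accumulator loop, as in the Python
def moveballs (balls : List Int) : List Int :=
  balls.foldl (fun newballs ball => if ball ≠ -1 ∧ ball ≠ 0 then newballs ++ [ball] else newballs) []

-- A's while loop. fuel only makes termination evident: the loop advances i by 1 each
-- iteration and the list length never changes, so fuel = length + 1 always suffices.
-- balls[i] is read only when i < len (and balls[i+1] only when i ≠ len-1), so getD's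
-- default is unreachable; the slice balls[i-cnt+1:i+1] = [-1]*cnt always has
-- 0 ≤ i-cnt+1 (cnt ≤ i+1 throughout), so take/replicate/drop is exact.
def explosionLoop : Nat → List Int → Nat → Nat → Bool → Int → List Int × Bool × Int
  | 0, balls, _, _, check, total => (balls, check, total)
  | fuel+1, balls, i, cnt, check, total =>
    if i < balls.length then
      if i = balls.length - 1 then
        if 4 ≤ cnt then
          (balls.take (i+1-cnt) ++ List.replicate cnt (-1) ++ balls.drop (i+1), true,
           total + cnt * balls.getD i 0)
        else (balls, check, total)
      else
        if balls.getD i 0 ≠ balls.getD (i+1) 0 then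
          if 4 ≤ cnt then
            explosionLoop fuel
              (balls.take (i+1-cnt) ++ List.replicate cnt (-1) ++ balls.drop (i+1))
              (i+1) 1 true (total + cnt * balls.getD i 0)
          else explosionLoop fuel balls (i+1) 1 check total
        else explosionLoop fuel balls (i+1) (cnt+1) check total
    else (balls, check, total)

def explosion (balls : List Int) : List Int × Bool × Int :=
  let r := explosionLoop (balls.length + 1) balls 0 1 false 0
  (moveballs r.1, r.2.1, r.2.2)

-- ===== PORT B =====
-- inner while `while j < L and balls[j] == v: j += 1`: count of leading elements equal to v
def runLen (v : Int) : List Int → Nat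
  | [] => 0
  | b :: t => if b = v then runLen v t + 1 else 0

-- outer while of Source B; `rest` is the suffix balls[i:], advancing i by n = drop n
def explosionAltLoop (rest : List Int) (out : List Int) (check : Bool) (total : Int) :
    List Int × Bool × Int :=
  match rest with
  | [] => (out, check, total)
  | v :: t =>
    let n := runLen v (v :: t)
    if 4 ≤ n then
      explosionAltLoop ((v :: t).drop n) out true (total + n * v)
    else if v ≠ -1 ∧ v ≠ 0 then
      explosionAltLoop ((v :: t).drop n) (out ++ List.replicate n v) check total
    else
      explosionAltLoop ((v :: t).drop n) out check total
termination_by rest.length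
decreasing_by all_goals (simp [runLen]; try omega)

def explosion_alt (balls : List Int) : List Int × Bool × Int :=
  explosionAltLoop balls [] false 0

-- ===== PRECONDITION & SPEC =====
def Spec_explosion (balls : List Int) (out : List Int × Bool × Int) : Prop := out = explosion_alt balls
instance (balls : List Int) (out : List Int × Bool × Int) : Decidable (Spec_explosion balls out) := by unfold Spec_explosion; infer_instance

-- ===== CLAIM (what is proved, stated in full; the proofs are below) =====
def Claim_equal_explosion : Prop := ∀ (balls : List Int), Dom_explosion balls → Spec_explosion balls (explosion balls)

-- ===== LEMMAS AND PROOFS =====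

-- proof-side characterisation: process the list run by run, producing A's marked list,
-- the check flag and the total in one pass
def runFold : List Int → List Int × Bool × Int
  | [] => ([], false, 0)
  | v :: t =>
    let n := runLen v t + 1
    let r := runFold (t.drop (runLen v t))
    ((if 4 ≤ n then List.replicate n (-1) else List.replicate n v) ++ r.1,
     decide (4 ≤ n) || r.2.1,
     (if 4 ≤ n then (n : Int) * v else 0) + r.2.2)
termination_by l => l.length
decreasing_by simp; try omega

lemma runLen_le (v : Int) (t : List Int) : runLen v t ≤ t.length := by
  induction t with
  | nil => simp [runLen]
  | cons b t ih => simp only [runLen]; split <;> (simp; try omega)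

lemma decomp (v : Int) (t : List Int) :
    List.replicate (runLen v t) v ++ t.drop (runLen v t) = t := by
  induction t with
  | nil => simp [runLen]
  | cons b t ih =>
    simp only [runLen]; split
    · subst b; simpa [List.replicate_succ] using ih
    · simp

lemma head_drop_ne (v : Int) (t : List Int) :
    (t.drop (runLen v t)).head? ≠ some v := by
  induction t with
  | nil => simp [runLen]
  | cons b t ih =>
    simp only [runLen]; split
    · simpa [List.head?_drop] using ih
    · simp_all

lemma runLen_replicate_append (v : Int) (n : Nat) (r : List Int) (h : r.head? ≠ some v) :
    runLen v (List.replicate n v ++ r) = n := by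
  induction n with
  | zero =>
    simp only [List.replicate, List.nil_append]
    cases r with
    | nil => simp [runLen]
    | cons b t =>
      simp only [List.head?_cons, ne_eq, Option.some.injEq] at h
      simp [runLen, h]
  | succ n ih => simp [List.replicate_succ, runLen, ih]

lemma moveballs_eq_filter (l : List Int) :
    moveballs l = l.filter (fun b => !(b == -1) && !(b == 0)) := by
  suffices h : ∀ (l : List Int) (acc : List Int),
      l.foldl (fun newballs ball => if ball ≠ -1 ∧ ball ≠ 0 then newballs ++ [ball] else newballs) acc
        = acc ++ l.filter (fun b => !(b == -1) && !(b == 0)) by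
    simpa [moveballs] using h l []
  intro l
  induction l with
  | nil => simp
  | cons b t ih =>
    intro acc
    simp only [List.foldl_cons, List.filter_cons]
    by_cases hb : b = -1 ∨ b = 0
    · rcases hb with hb | hb <;> subst hb <;> simp [ih]
    · push Not at hb
      simp [hb.1, hb.2, ih]

-- runFold on a maximal leading run
lemma runFold_run (v : Int) (n : Nat) (r : List Int) (h1 : 1 ≤ n) (h : r.head? ≠ some v) :
    runFold (List.replicate n v ++ r)
      = ((if 4 ≤ n then List.replicate n (-1) else List.replicate n v) ++ (runFold r).1,
         decide (4 ≤ n) || (runFold r).2.1,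
         (if 4 ≤ n then (n : Int) * v else 0) + (runFold r).2.2) := by
  obtain ⟨m, rfl⟩ : ∃ m, n = m + 1 := ⟨n - 1, by omega⟩
  rw [List.replicate_succ, List.cons_append, runFold]
  have hr : runLen v (List.replicate m v ++ r) = m := runLen_replicate_append v m r h
  have hd : (List.replicate m v ++ r).drop m = r := by
    simp [List.drop_left]
  simp only [hr, hd]
  split_ifs <;> simp [List.replicate_succ]

lemma moveballs_replicate_append (c : Int) (n : Nat) (r : List Int) :
    moveballs (List.replicate n c ++ r)
      = (if c ≠ -1 ∧ c ≠ 0 then List.replicate n c else []) ++ moveballs r := by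
  simp only [moveballs_eq_filter, List.filter_append, List.filter_replicate]
  split_ifs with h1 h2 h2 <;> simp_all

-- B's loop accumulates exactly moveballs of runFold's marked list
lemma B_eq (rest out : List Int) (check : Bool) (total : Int) :
    explosionAltLoop rest out check total
      = (out ++ moveballs (runFold rest).1, check || (runFold rest).2.1,
         total + (runFold rest).2.2) := by
  fun_induction explosionAltLoop rest out check total with
  | case1 out check total => simp [runFold, moveballs]
  | case2 out check total v t n h4 ih =>
    rw [ih, runFold]
    have hn : n = runLen v t + 1 := by simp [n, runLen]
    have hdrop : (v :: t).drop n = t.drop (runLen v t) := by rw [hn]; simp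
    rw [← hdrop]
    simp only [← hn]
    simp only [if_pos h4, moveballs_replicate_append, Prod.mk.injEq]
    refine ⟨by simp, by simp [h4], by ring⟩
  | case3 out check total v t n h4 hv ih =>
    rw [ih, runFold]
    have hn : n = runLen v t + 1 := by simp [n, runLen]
    have hdrop : (v :: t).drop n = t.drop (runLen v t) := by rw [hn]; simp
    rw [← hdrop]
    simp only [← hn]
    simp only [if_neg h4, moveballs_replicate_append, if_pos hv, Prod.mk.injEq]
    refine ⟨by simp, by simp [h4], by ring⟩
  | case4 out check total v t n h4 hv ih =>
    rw [ih, runFold]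
    have hn : n = runLen v t + 1 := by simp [n, runLen]
    have hdrop : (v :: t).drop n = t.drop (runLen v t) := by rw [hn]; simp
    rw [← hdrop]
    simp only [← hn]
    simp only [if_neg h4, moveballs_replicate_append, if_neg hv, Prod.mk.injEq]
    refine ⟨by simp, by simp [h4], by ring⟩

-- A's loop, entered j elements into a run of n copies of v that follows pre
lemma A_walk : ∀ (fuel : Nat) (pre : List Int) (v : Int) (n j : Nat) (rest' : List Int)
    (check : Bool) (total : Int),
    1 ≤ j → j ≤ n → rest'.head? ≠ some v →
    (n - j) + rest'.length + 1 ≤ fuel →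
    explosionLoop fuel (pre ++ (List.replicate n v ++ rest')) (pre.length + j - 1) j check total
      = (pre ++ (runFold (List.replicate n v ++ rest')).1,
         check || (runFold (List.replicate n v ++ rest')).2.1,
         total + (runFold (List.replicate n v ++ rest')).2.2) := by
  intro fuel
  induction fuel with
  | zero => intro pre v n j rest' check total hj1 hjn hhead hfuel; omega
  | succ fuel ih =>
    intro pre v n j rest' check total hj1 hjn hhead hfuel
    have hlen : (pre ++ (List.replicate n v ++ rest')).length
        = pre.length + n + rest'.length := by simp; omega
    have hi : pre.length + j - 1 < (pre ++ (List.replicate n v ++ rest')).length := by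
      rw [hlen]; omega
    have hgi : (pre ++ (List.replicate n v ++ rest')).getD (pre.length + j - 1) 0 = v := by
      rw [List.getD_append_right _ _ _ _ (by omega),
          show pre.length + j - 1 - pre.length = j - 1 by omega,
          List.getD_eq_getElem?_getD, List.getElem?_append_left (by simp; omega)]
      rw [List.getElem?_replicate, if_pos (show j - 1 < n by omega)]; rfl
    rw [explosionLoop, if_pos hi]
    by_cases hlast : pre.length + j - 1 = (pre ++ (List.replicate n v ++ rest')).length - 1
    · -- last element: j = n and rest' = []
      have hlast' := hlast
      rw [hlen] at hlast'
      have hre : rest' = [] := by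
        cases rest' with
        | nil => rfl
        | cons w t => exfalso; simp at hlast'; omega
      subst hre
      have hj : n = j := by simp at hlast'; omega
      subst hj
      rw [if_pos hlast]
      have hrf : runFold (List.replicate n v ++ ([] : List Int))
          = ((if 4 ≤ n then List.replicate n (-1) else List.replicate n v) ++ [],
             decide (4 ≤ n) || false, (if 4 ≤ n then (n : Int) * v else 0) + 0) := by
        rw [runFold_run v n [] (by omega) (by simp)]; simp [runFold]
      by_cases h4 : 4 ≤ n
      · rw [if_pos h4]
        have htake : (pre ++ (List.replicate n v ++ [])).take (pre.length + n - 1 + 1 - n) = pre := by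
          rw [show pre.length + n - 1 + 1 - n = pre.length by omega]
          exact List.take_left
        have hdrp : (pre ++ (List.replicate n v ++ [])).drop (pre.length + n - 1 + 1) = [] := by
          apply List.drop_eq_nil_of_le; simp; omega
        rw [htake, hdrp, hgi, hrf]
        simp only [if_pos h4, Prod.mk.injEq]
        refine ⟨by simp, by simp [h4], by ring⟩
      · rw [if_neg h4]
        rw [hrf]
        simp only [if_neg h4, Prod.mk.injEq]
        refine ⟨by simp, by simp [h4], by ring⟩
    · rw [if_neg hlast]
      rw [hlen] at hlast
      by_cases hjlt : j < n
      · -- inside the run: balls[i] = balls[i+1] = v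
        have hgi1 : (pre ++ (List.replicate n v ++ rest')).getD (pre.length + j - 1 + 1) 0 = v := by
          rw [show pre.length + j - 1 + 1 = pre.length + j by omega,
              List.getD_append_right _ _ _ _ (by omega),
              show pre.length + j - pre.length = j by omega,
              List.getD_eq_getElem?_getD, List.getElem?_append_left (by simp; omega)]
          rw [List.getElem?_replicate, if_pos hjlt]; rfl
        rw [if_neg (show ¬_ by rw [hgi, hgi1]; simp)]
        have := ih pre v n (j + 1) rest' check total (by omega) (by omega) hhead (by omega)
        rw [show pre.length + j - 1 + 1 = pre.length + (j + 1) - 1 by omega]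
        exact this
      · -- at the boundary of the run: j = n, rest' = w :: t, balls[i+1] = w ≠ v
        have hj : n = j := by omega
        subst hj
        obtain ⟨w, t, rfl⟩ : ∃ w t, rest' = w :: t := by
          cases rest' with
          | nil => exfalso; apply hlast; simp
          | cons w t => exact ⟨w, t, rfl⟩
        have hwv : w ≠ v := by simpa using hhead
        have hgi1 : (pre ++ (List.replicate n v ++ (w :: t))).getD (pre.length + n - 1 + 1) 0 = w := by
          rw [show pre.length + n - 1 + 1 = pre.length + n by omega,
              List.getD_append_right _ _ _ _ (by omega),
              show pre.length + n - pre.length = n by omega,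
              List.getD_eq_getElem?_getD, List.getElem?_append_right (by simp)]
          simp
        rw [if_pos (show _ ≠ _ by rw [hgi, hgi1]; exact fun h => hwv h.symm)]
        have hdec : w :: t = List.replicate (runLen w t + 1) w ++ t.drop (runLen w t) := by
          rw [List.replicate_succ, List.cons_append, decomp]
        have hrfr := runFold_run v n (w :: t) (by omega) (by simpa using hwv)
        by_cases h4 : 4 ≤ n
        · rw [if_pos h4]
          have htake : (pre ++ (List.replicate n v ++ (w :: t))).take (pre.length + n - 1 + 1 - n)
              = pre := by
            rw [show pre.length + n - 1 + 1 - n = pre.length by omega]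
            exact List.take_left
          have hdrp : (pre ++ (List.replicate n v ++ (w :: t))).drop (pre.length + n - 1 + 1)
              = w :: t := by
            rw [show pre.length + n - 1 + 1 = pre.length + n by omega, ← List.append_assoc]
            simp [List.drop_left]
          rw [htake, hdrp, hgi]
          have hih := ih (pre ++ List.replicate n (-1)) w (runLen w t + 1) 1 (t.drop (runLen w t))
            true (total + (n : Int) * v) (by omega) (by omega) (head_drop_ne w t)
            (by have h1 := runLen_le w t
                simp only [List.length_drop, List.length_cons] at hfuel ⊢; omega)
          rw [← hdec] at hih
          simp only [List.length_append, List.length_replicate] at hih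
          rw [show pre.length + n - 1 + 1 = pre.length + n + 1 - 1 by omega, hih, hrfr]
          simp only [if_pos h4, Prod.mk.injEq]
          refine ⟨by simp, by simp [h4], by ring⟩
        · rw [if_neg h4]
          have hih := ih (pre ++ List.replicate n v) w (runLen w t + 1) 1 (t.drop (runLen w t))
            check total (by omega) (by omega) (head_drop_ne w t)
            (by have h1 := runLen_le w t
                simp only [List.length_drop, List.length_cons] at hfuel ⊢; omega)
          rw [← hdec, List.append_assoc] at hih
          simp only [List.length_append, List.length_replicate] at hih
          rw [show pre.length + n - 1 + 1 = pre.length + n + 1 - 1 by omega, hih, hrfr]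
          simp only [if_neg h4, Prod.mk.injEq]
          refine ⟨by simp, by simp [h4], by ring⟩

lemma A_eq (balls : List Int) :
    explosionLoop (balls.length + 1) balls 0 1 false 0
      = ((runFold balls).1, (runFold balls).2.1, (runFold balls).2.2) := by
  cases balls with
  | nil => simp [explosionLoop, runFold]
  | cons v t =>
    have hdec : v :: t = List.replicate (runLen v t + 1) v ++ t.drop (runLen v t) := by
      rw [List.replicate_succ, List.cons_append, decomp]
    have h := A_walk ((v :: t).length + 1) [] v (runLen v t + 1) 1 (t.drop (runLen v t))
      false 0 (by omega) (by omega) (head_drop_ne v t)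
      (by have := runLen_le v t; simp [List.length_drop]; omega)
    simp only [List.nil_append, List.length_nil, Nat.zero_add] at h
    rw [← hdec] at h
    simpa using h

-- ===== VERDICT (by name: the statement is the Claim_ definition above) =====
theorem explosion_spec : Claim_equal_explosion := by
  intro balls _
  show _ = _
  simp only [explosion, explosion_alt, A_eq, B_eq]
  simp
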